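-- pv_equiv track=rewrite | github.com/Dolkir643/afdparts_Bot | tg_bot.py | _take_up_to_3_unique_prices
-- ===== SOURCE A (Python) =====
-- def _take_up_to_3_unique_prices(items: list) -> list:
--     """До 3 позиций в секции, цены не повторяются, от меньшей к большей."""
--     sorted_items = sorted(items, key=lambda x: (x.get("price") is None, x.get("price") or 0))
--     seen_prices = set()
--     out = []
--     for it in sorted_items:
--         if len(out) >= 3:
--             break
--         p = it.get("price")
--         if p is not None and p in seen_prices:
--             continue
--         if p is not None:
--             seen_prices.add(p)
--         out.append(it)
--     return out
-- ===== SOURCE B (Python) =====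
-- def _take_up_to_3_unique_prices(items: list) -> list:
--     """До 3 позиций в секции, цены не повторяются, от меньшей к большей.
--
--     One pass: remember the earliest item per price and the price-less items,
--     then a capped insertion (partial selection) of the 3 smallest prices.
--     """
--     earliest = {}   # price -> earliest item with that price
--     nones = []      # items without a price, in original order
--     for it in items:
--         p = it.get("price")
--         if p is None:
--             nones.append(it)
--         elif p not in earliest:
--             earliest[p] = it
--     best = []       # up to 3 (price, item) pairs, ascending by price
--     for pair in earliest.items():
--         _insert_asc(best, pair)
--         if len(best) > 3:
--             best.pop()
--     out = [it for _, it in best]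
--     out.extend(nones[: 3 - len(out)])
--     return out
--
--
-- def _insert_asc(best, pair):
--     for j, q in enumerate(best):
--         if pair[0] < q[0]:
--             best.insert(j, pair)
--             return
--     best.append(pair)
-- ===== Notes on version B (the rewrite author's own statement) =====
-- stated objective: alternative
-- what changed: A sorts the whole list by (price is None, price) and then scans it with a seen-set and a break at 3; B never sorts: one pass records the earliest item per price and the price-less items, then a capped insertion (partial selection) picks the up-to-3 smallest distinct prices.
import Mathlib
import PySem

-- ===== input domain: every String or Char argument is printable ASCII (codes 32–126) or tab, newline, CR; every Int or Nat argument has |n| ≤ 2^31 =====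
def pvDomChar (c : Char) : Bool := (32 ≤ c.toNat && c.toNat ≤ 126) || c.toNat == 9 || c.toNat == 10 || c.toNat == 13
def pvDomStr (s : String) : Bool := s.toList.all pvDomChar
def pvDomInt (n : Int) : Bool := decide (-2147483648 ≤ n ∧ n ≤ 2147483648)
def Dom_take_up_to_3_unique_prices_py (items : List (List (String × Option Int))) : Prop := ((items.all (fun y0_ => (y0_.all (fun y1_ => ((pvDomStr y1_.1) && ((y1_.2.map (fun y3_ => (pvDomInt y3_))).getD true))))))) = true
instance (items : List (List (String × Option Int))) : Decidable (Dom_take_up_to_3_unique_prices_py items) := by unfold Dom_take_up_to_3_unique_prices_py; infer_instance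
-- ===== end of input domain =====

-- B replaces A's sort-then-scan by a single pass that records the earliest item per
-- price plus a capped-at-3 insertion (partial selection) of the smallest distinct
-- prices (alternative algorithm). Same return value; neither version mutates its argument.

-- shared helper: Python's it.get("price") (both A and B call it)
def pvGetPrice (it : List (String × Option Int)) : Option Int :=
  ((PySem.Dict.mk it).get? "price").join

-- ===== PORT A =====
-- the "for it in sorted_items" loop, with its break/continue, seen_prices set and out list
def pvLoopA : List (List (String × Option Int)) → PySem.Set Int →
    List (List (String × Option Int)) → List (List (String × Option Int))
  | [], _, out => out
  | it :: rest, seen, out =>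
    if 3 ≤ out.length then out
    else
      match pvGetPrice it with
      | some p =>
        if PySem.Set.contains seen p then pvLoopA rest seen out
        else pvLoopA rest (PySem.Set.add seen p) (out ++ [it])
      | none => pvLoopA rest seen (out ++ [it])

def take_up_to_3_unique_prices_py (items : List (List (String × Option Int))) : List (List (String × Option Int)) :=
  let sorted_items := PySem.List.sorted2 items
    (fun x => (pvGetPrice x).isNone) (fun x => (pvGetPrice x).getD 0)
  pvLoopA sorted_items PySem.Set.empty []

-- ===== PORT B =====
-- _insert_asc: insert before the first pair with a larger price, else append
def pvInsertAsc (pr : Int × List (String × Option Int)) :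
    List (Int × List (String × Option Int)) → List (Int × List (String × Option Int))
  | [] => [pr]
  | q :: qs => if pr.1 < q.1 then pr :: q :: qs else q :: pvInsertAsc pr qs

def take_up_to_3_unique_prices_py_alt (items : List (List (String × Option Int))) : List (List (String × Option Int)) :=
  let st := items.foldl
    (fun (s : PySem.Dict Int (List (String × Option Int)) × List (List (String × Option Int))) it =>
      match pvGetPrice it with
      | none => (s.1, s.2 ++ [it])
      | some p => if s.1.contains p then s else (s.1.insert p it, s.2))
    (PySem.Dict.empty, [])
  let best := st.1.items.foldl
    (fun best pr =>
      let b := pvInsertAsc pr best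
      if 3 < b.length then b.dropLast else b) []
  let out := best.map (fun q => q.2)
  out ++ st.2.take (3 - out.length)

-- ===== PRECONDITION & SPEC =====
def Spec_take_up_to_3_unique_prices_py (items : List (List (String × Option Int))) (out : List (List (String × Option Int))) : Prop := out = take_up_to_3_unique_prices_py_alt items
instance (items : List (List (String × Option Int))) (out : List (List (String × Option Int))) : Decidable (Spec_take_up_to_3_unique_prices_py items out) := by unfold Spec_take_up_to_3_unique_prices_py; infer_instance

-- ===== CLAIM (what is proved, stated in full; the proofs are below) =====
def Claim_equal_take_up_to_3_unique_prices_py : Prop := ∀ (items : List (List (String × Option Int))), Dom_take_up_to_3_unique_prices_py items → Spec_take_up_to_3_unique_prices_py items (take_up_to_3_unique_prices_py items)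

-- ===== LEMMAS AND PROOFS =====

-- abbreviations used only by the proofs
abbrev pvItem : Type := List (String × Option Int)
def pvKV (x : pvItem) : Int := (pvGetPrice x).getD 0
def pvB1 (a b : pvItem) : Bool := decide (pvKV a < pvKV b)
def pvB2 (a b : pvItem) : Bool :=
  decide ((pvGetPrice a).isNone < (pvGetPrice b).isNone) ||
    (!decide ((pvGetPrice b).isNone < (pvGetPrice a).isNone) && decide (pvKV a < pvKV b))

-- first item per distinct price, in traversal order, skipping prices the seen-predicate holds
def pvFpp : List pvItem → (Int → Bool) → List (Int × pvItem)
  | [], _ => []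
  | x :: r, s =>
    match pvGetPrice x with
    | none => pvFpp r s
    | some p => if s p then pvFpp r s else (p, x) :: pvFpp r (fun q => q == p || s q)

lemma pvFpp_mem (zs : List pvItem) (s : Int → Bool) (pr : Int × pvItem) :
    pr ∈ pvFpp zs s ↔
      s pr.1 = false ∧ (zs.filter (fun y => pvGetPrice y == some pr.1)).head? = some pr.2 := by
  induction zs generalizing s with
  | nil => simp [pvFpp]
  | cons x r ih =>
    cases hx : pvGetPrice x with
    | none =>
      have hfil : (x :: r).filter (fun y => pvGetPrice y == some pr.1)
          = r.filter (fun y => pvGetPrice y == some pr.1) := by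
        simp [List.filter_cons, hx]
      rw [hfil]
      simp only [pvFpp, hx]
      exact ih s
    | some p =>
      rcases eq_or_ne pr.1 p with h1 | h1
      · have hfil : (x :: r).filter (fun y => pvGetPrice y == some pr.1)
            = x :: r.filter (fun y => pvGetPrice y == some pr.1) := by
          simp [List.filter_cons, hx, h1]
        rw [hfil]
        by_cases hsp : s p = true
        · simp only [pvFpp, hx, hsp, if_pos]
          constructor
          · intro h; exact absurd ((ih s).mp h).1 (by simp [h1, hsp])
          · rintro ⟨h, -⟩; rw [h1] at h; simp [hsp] at h
        · have hsp' : s p = false := by simpa using hsp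
          simp only [pvFpp, hx, hsp', Bool.false_eq_true, if_false, List.mem_cons,
            List.head?_cons]
          constructor
          · rintro (h | h)
            · subst h; exact ⟨by simpa [h1] using hsp', rfl⟩
            · exfalso
              have := ((ih _).mp h).1
              simp [h1] at this
          · rintro ⟨-, h2⟩
            left
            have h2' : pr.2 = x := by simpa using h2.symm
            have hpr : pr = (pr.1, pr.2) := rfl
            rw [hpr, h1, h2']
      · have hfil : (x :: r).filter (fun y => pvGetPrice y == some pr.1)
            = r.filter (fun y => pvGetPrice y == some pr.1) := by
          simp [List.filter_cons, hx, Ne.symm h1]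
        rw [hfil]
        by_cases hsp : s p = true
        · simp only [pvFpp, hx, hsp, if_pos]
          exact ih s
        · have hsp' : s p = false := by simpa using hsp
          simp only [pvFpp, hx, hsp', Bool.false_eq_true, if_false, List.mem_cons]
          rw [ih]
          have hpr1 : (pr.1 == p || s pr.1) = s pr.1 := by simp [h1]
          rw [hpr1]
          constructor
          · rintro (h | h)
            · exfalso; exact h1 (by rw [h])
            · exact h
          · intro h; right; exact h

lemma pvFpp_nodup (zs : List pvItem) (s : Int → Bool) : (pvFpp zs s).Nodup := by
  induction zs generalizing s with
  | nil => simp [pvFpp]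
  | cons x r ih =>
    cases hx : pvGetPrice x with
    | none => simpa only [pvFpp, hx] using ih s
    | some p =>
      by_cases hsp : s p = true
      · simpa only [pvFpp, hx, hsp, if_pos] using ih s
      · have hsp' : s p = false := by simpa using hsp
        simp only [pvFpp, hx, hsp', Bool.false_eq_true, if_false, List.nodup_cons]
        refine ⟨fun hmem => ?_, ih _⟩
        have := ((pvFpp_mem _ _ _).mp hmem).1
        simp at this

lemma pvFpp_pairwise (zs : List pvItem) (s : Int → Bool)
    (hp : zs.Pairwise (fun a b => pvKV a ≤ pvKV b)) :
    (pvFpp zs s).Pairwise (fun a b => a.1 < b.1) := by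
  induction zs generalizing s with
  | nil => simp [pvFpp]
  | cons x r ih =>
    have hp' := (List.pairwise_cons.mp hp).2
    have hxle := (List.pairwise_cons.mp hp).1
    cases hx : pvGetPrice x with
    | none => simpa only [pvFpp, hx] using ih s hp'
    | some p =>
      by_cases hsp : s p = true
      · simpa only [pvFpp, hx, hsp, if_pos] using ih s hp'
      · have hsp' : s p = false := by simpa using hsp
        simp only [pvFpp, hx, hsp', Bool.false_eq_true, if_false, List.pairwise_cons]
        refine ⟨fun pr hmem => ?_, ih _ hp'⟩
        have hm := (pvFpp_mem _ _ _).mp hmem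
        have hne : pr.1 ≠ p := by
          intro h
          have := hm.1
          rw [h] at this; simp at this
        -- pr.2 is a member of r with price pr.1, so p = pvKV x ≤ pvKV pr.2 = pr.1
        have hhead := hm.2
        have hmem2 : pr.2 ∈ r.filter (fun y => pvGetPrice y == some pr.1) := by
          rcases List.head?_eq_some_iff.mp hhead with ⟨t, ht⟩
          rw [ht]; exact List.mem_cons_self
        have hmemr : pr.2 ∈ r ∧ pvGetPrice pr.2 = some pr.1 := by
          have := List.mem_filter.mp hmem2
          exact ⟨this.1, by simpa using this.2⟩
        have hle : pvKV x ≤ pvKV pr.2 := hxle pr.2 hmemr.1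
        have : pvKV x = p := by simp [pvKV, hx]
        have h2 : pvKV pr.2 = pr.1 := by simp [pvKV, hmemr.2]
        omega

lemma pvSet_contains_add (seen : PySem.Set Int) (p : Int) :
    (fun q => PySem.Set.contains (PySem.Set.add seen p) q) = (fun q => q == p || PySem.Set.contains seen q) := by
  funext q
  have : PySem.Set.contains (PySem.Set.add seen p) q = true ↔ (q == p || PySem.Set.contains seen q) = true := by
    simp [PySem.Set.contains_iff, PySem.Set.mem_add]
    tauto
  exact Bool.eq_iff_iff.mpr this

lemma pvLoopA_nones (zs : List pvItem) (seen : PySem.Set Int) (out : List pvItem)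
    (hn : ∀ x ∈ zs, pvGetPrice x = none) :
    pvLoopA zs seen out = out ++ zs.take (3 - out.length) := by
  induction zs generalizing seen out with
  | nil => simp [pvLoopA]
  | cons x r ih =>
    have hx : pvGetPrice x = none := hn x List.mem_cons_self
    have hn' : ∀ y ∈ r, pvGetPrice y = none := fun y hy => hn y (List.mem_cons_of_mem _ hy)
    by_cases hlen : 3 ≤ out.length
    · have h0 : 3 - out.length = 0 := by omega
      simp [pvLoopA, hlen, h0]
    · simp only [pvLoopA, if_neg hlen, hx]
      rw [ih seen _ hn']
      obtain ⟨k, hk⟩ : ∃ k, 3 - out.length = k + 1 := ⟨3 - out.length - 1, by omega⟩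
      rw [hk, List.take_succ_cons]
      have hk' : 3 - (out ++ [x]).length = k := by simp; omega
      rw [hk']
      simp

lemma pvLoopA_split (xs ys : List pvItem) (seen : PySem.Set Int) (out : List pvItem)
    (hs : ∀ x ∈ xs, (pvGetPrice x).isSome) (hn : ∀ y ∈ ys, pvGetPrice y = none) :
    pvLoopA (xs ++ ys) seen out =
      (out ++ ((pvFpp xs (fun q => PySem.Set.contains seen q)).map Prod.snd).take (3 - out.length))
        ++ ys.take (3 - (out ++ ((pvFpp xs (fun q => PySem.Set.contains seen q)).map Prod.snd).take (3 - out.length)).length) := by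
  induction xs generalizing seen out with
  | nil =>
    simp only [List.nil_append, pvFpp, List.map_nil, List.take_nil, List.append_nil]
    exact pvLoopA_nones ys seen out hn
  | cons x r ih =>
    rcases Option.isSome_iff_exists.mp (hs x List.mem_cons_self) with ⟨p, hx⟩
    have hs' : ∀ y ∈ r, (pvGetPrice y).isSome := fun y hy => hs y (List.mem_cons_of_mem _ hy)
    by_cases hlen : 3 ≤ out.length
    · have h0 : 3 - out.length = 0 := by omega
      rw [List.cons_append]
      simp [pvLoopA, if_pos hlen, h0]
    · by_cases hsp : PySem.Set.contains seen p = true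
      · rw [List.cons_append]
        simp only [pvLoopA, if_neg hlen, hx, hsp, if_pos]
        rw [ih seen out hs']
        simp only [pvFpp, hx, hsp, if_pos]
      · have hsp' : PySem.Set.contains seen p = false := by simpa using hsp
        rw [List.cons_append]
        simp only [pvLoopA, if_neg hlen, hx, hsp', Bool.false_eq_true, if_false]
        rw [ih _ _ hs']
        simp only [pvFpp, hx, hsp', Bool.false_eq_true, if_false, List.map_cons]
        rw [pvSet_contains_add]
        obtain ⟨k, hk⟩ : ∃ k, 3 - out.length = k + 1 := ⟨3 - out.length - 1, by omega⟩
        rw [hk, List.take_succ_cons]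
        have hk' : 3 - (out ++ [x]).length = k := by simp; omega
        rw [hk']
        simp

lemma pvB2_none (x y : pvItem) (hx : pvGetPrice x = none) : pvB2 x y = false := by
  unfold pvB2
  cases hy : pvGetPrice y with
  | none => simp [hx, hy, pvKV]
  | some q => simp [hx, hy]

lemma pvB2_some_some (x y : pvItem) {p q : Int} (hx : pvGetPrice x = some p)
    (hy : pvGetPrice y = some q) : pvB2 x y = pvB1 x y := by
  unfold pvB2 pvB1
  simp [hx, hy]

lemma pvB2_some_none (x y : pvItem) {p : Int} (hx : pvGetPrice x = some p)
    (hy : pvGetPrice y = none) : pvB2 x y = true := by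
  unfold pvB2
  simp [hx, hy]

lemma pvInsertBy_none (x : pvItem) (hx : pvGetPrice x = none) (L : List pvItem) :
    PySem.List.insertBy pvB2 x L = L ++ [x] :=
  PySem.List.insertBy_of_forall_not_before _ _ _ (fun y _ => pvB2_none x y hx)

lemma pvInsertBy_some_split (x : pvItem) {p : Int} (hx : pvGetPrice x = some p)
    (S M : List pvItem) (hS : ∀ y ∈ S, (pvGetPrice y).isSome) (hM : ∀ y ∈ M, pvGetPrice y = none) :
    PySem.List.insertBy pvB2 x (S ++ M) = PySem.List.insertBy pvB1 x S ++ M := by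
  induction S with
  | nil =>
    simp only [List.nil_append, PySem.List.insertBy]
    cases M with
    | nil => simp [PySem.List.insertBy]
    | cons m M' =>
      have := pvB2_some_none x m hx (hM m List.mem_cons_self)
      simp [PySem.List.insertBy, this]
  | cons s S' ih =>
    rcases Option.isSome_iff_exists.mp (hS s List.mem_cons_self) with ⟨q, hq⟩
    have hb : pvB2 x s = pvB1 x s := pvB2_some_some x s hx hq
    by_cases h : pvB1 x s = true
    · simp [PySem.List.insertBy, hb, h]
    · have h' : pvB1 x s = false := by simpa using h
      simp only [List.cons_append, PySem.List.insertBy, hb, h', Bool.false_eq_true, if_false]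
      rw [ih (fun y hy => hS y (List.mem_cons_of_mem _ hy))]

lemma pvInsertBy_pairwise (x : pvItem) (S : List pvItem)
    (hp : S.Pairwise (fun a b => pvKV a ≤ pvKV b)) :
    (PySem.List.insertBy pvB1 x S).Pairwise (fun a b => pvKV a ≤ pvKV b) := by
  induction S with
  | nil => simp [PySem.List.insertBy]
  | cons s S' ih =>
    have hhead := (List.pairwise_cons.mp hp).1
    have htail := (List.pairwise_cons.mp hp).2
    by_cases h : pvB1 x s = true
    · have hlt : pvKV x < pvKV s := by simpa [pvB1] using h
      simp only [PySem.List.insertBy, h, if_pos]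
      refine List.pairwise_cons.mpr ⟨?_, hp⟩
      intro y hy
      rcases List.mem_cons.mp hy with rfl | hy'
      · omega
      · have := hhead y hy'; omega
    · have h' : pvB1 x s = false := by simpa using h
      have hle : pvKV s ≤ pvKV x := by
        have : ¬ (pvKV x < pvKV s) := by simpa [pvB1] using h
        omega
      simp only [PySem.List.insertBy, h', Bool.false_eq_true, if_false]
      refine List.pairwise_cons.mpr ⟨?_, ih htail⟩
      intro y hy
      rcases (PySem.List.mem_insertBy _ _ _ _).mp hy with rfl | hy'
      · exact hle
      · exact hhead y hy'

lemma pvSort_split_gen (l : List pvItem) (S M : List pvItem)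
    (hS : ∀ y ∈ S, (pvGetPrice y).isSome) (hM : ∀ y ∈ M, pvGetPrice y = none)
    (hp : S.Pairwise (fun a b => pvKV a ≤ pvKV b)) :
    l.foldl (fun acc x => PySem.List.insertBy pvB2 x acc) (S ++ M) =
      (l.filter (fun x => (pvGetPrice x).isSome)).foldl (fun acc x => PySem.List.insertBy pvB1 x acc) S
        ++ (M ++ l.filter (fun x => (pvGetPrice x).isNone)) := by
  induction l generalizing S M with
  | nil => simp
  | cons x r ih =>
    cases hx : pvGetPrice x with
    | none =>
      have h1 : PySem.List.insertBy pvB2 x (S ++ M) = S ++ (M ++ [x]) := by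
        rw [pvInsertBy_none x hx]; simp
      simp only [List.foldl_cons, h1]
      have hM' : ∀ y ∈ M ++ [x], pvGetPrice y = none := by
        intro y hy
        rcases List.mem_append.mp hy with h | h
        · exact hM y h
        · simp at h; rw [h]; exact hx
      rw [ih S (M ++ [x]) hS hM' hp]
      have hfs : (x :: r).filter (fun z => (pvGetPrice z).isSome) = r.filter (fun z => (pvGetPrice z).isSome) := by
        simp [List.filter_cons, hx]
      have hfn : (x :: r).filter (fun z => (pvGetPrice z).isNone) = x :: r.filter (fun z => (pvGetPrice z).isNone) := by
        simp [List.filter_cons, hx]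
      rw [hfs, hfn]
      simp
    | some p =>
      have h1 : PySem.List.insertBy pvB2 x (S ++ M) = PySem.List.insertBy pvB1 x S ++ M :=
        pvInsertBy_some_split x hx S M hS hM
      simp only [List.foldl_cons, h1]
      have hS' : ∀ y ∈ PySem.List.insertBy pvB1 x S, (pvGetPrice y).isSome := by
        intro y hy
        rcases (PySem.List.mem_insertBy _ _ _ _).mp hy with rfl | hy'
        · simp [hx]
        · exact hS y hy'
      rw [ih _ M hS' hM (pvInsertBy_pairwise x S hp)]
      have hfs : (x :: r).filter (fun z => (pvGetPrice z).isSome) = x :: r.filter (fun z => (pvGetPrice z).isSome) := by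
        simp [List.filter_cons, hx]
      have hfn : (x :: r).filter (fun z => (pvGetPrice z).isNone) = r.filter (fun z => (pvGetPrice z).isNone) := by
        simp [List.filter_cons, hx]
      rw [hfs, hfn]
      simp

lemma pvSort_split (items : List pvItem) :
    PySem.List.sorted2 items (fun x => (pvGetPrice x).isNone) (fun x => (pvGetPrice x).getD 0) =
      PySem.List.sorted (items.filter (fun x => (pvGetPrice x).isSome)) pvKV
        ++ items.filter (fun x => (pvGetPrice x).isNone) := by
  have h2 : PySem.List.sorted2 items (fun x => (pvGetPrice x).isNone) (fun x => (pvGetPrice x).getD 0)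
      = items.foldl (fun acc x => PySem.List.insertBy pvB2 x acc) ([] ++ []) := by
    rfl
  have h1 : PySem.List.sorted (items.filter (fun x => (pvGetPrice x).isSome)) pvKV
      = (items.filter (fun x => (pvGetPrice x).isSome)).foldl (fun acc x => PySem.List.insertBy pvB1 x acc) [] := by
    rw [PySem.List.sorted_eq_foldl_insertBy]
    rfl
  rw [h2, h1, pvSort_split_gen items [] [] (by simp) (by simp) (by simp)]
  simp

lemma pvFilter_insertBy_neg {p : Int} (x : pvItem) (hx : (pvGetPrice x == some p) = false) (L : List pvItem) :
    (PySem.List.insertBy pvB1 x L).filter (fun y => pvGetPrice y == some p) =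
      L.filter (fun y => pvGetPrice y == some p) := by
  induction L with
  | nil => simp [PySem.List.insertBy, hx]
  | cons s S' ih =>
    by_cases h : pvB1 x s = true
    · simp [PySem.List.insertBy, h, List.filter_cons, hx]
    · have h' : pvB1 x s = false := by simpa using h
      simp only [PySem.List.insertBy, h', Bool.false_eq_true, if_false, List.filter_cons]
      by_cases hq : (pvGetPrice s == some p) = true
      · simp [hq, ih]
      · have hq' : (pvGetPrice s == some p) = false := by simpa using hq
        simp [hq', ih]

lemma pvFilter_insertBy_pos {p : Int} (x : pvItem) (hx : (pvGetPrice x == some p) = true)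
    (L : List pvItem) (hp : L.Pairwise (fun a b => pvKV a ≤ pvKV b)) :
    (PySem.List.insertBy pvB1 x L).filter (fun y => pvGetPrice y == some p) =
      L.filter (fun y => pvGetPrice y == some p) ++ [x] := by
  have hkvx : pvKV x = p := by
    have : pvGetPrice x = some p := by simpa using hx
    simp [pvKV, this]
  induction L with
  | nil => simp [PySem.List.insertBy, hx]
  | cons s S' ih =>
    have hhead := (List.pairwise_cons.mp hp).1
    have htail := (List.pairwise_cons.mp hp).2
    by_cases h : pvB1 x s = true
    · have hlt : pvKV x < pvKV s := by simpa [pvB1] using h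
      simp only [PySem.List.insertBy, h, if_pos]
      have hempty : (s :: S').filter (fun y => pvGetPrice y == some p) = [] := by
        rw [List.filter_eq_nil_iff]
        intro a ha
        intro hqa
        have hkva : pvKV a = p := by
          have : pvGetPrice a = some p := by simpa using hqa
          simp [pvKV, this]
        have : pvKV s ≤ pvKV a := by
          rcases List.mem_cons.mp ha with rfl | ha'
          · omega
          · exact hhead a ha'
        omega
      rw [show List.filter (fun y => pvGetPrice y == some p) (x :: s :: S')
            = x :: List.filter (fun y => pvGetPrice y == some p) (s :: S') by
          rw [List.filter_cons, if_pos hx], hempty]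
      simp
    · have h' : pvB1 x s = false := by simpa using h
      simp only [PySem.List.insertBy, h', Bool.false_eq_true, if_false, List.filter_cons]
      by_cases hq : (pvGetPrice s == some p) = true
      · simp [hq, ih htail]
      · have hq' : (pvGetPrice s == some p) = false := by simpa using hq
        simp [hq', ih htail]

lemma pvSort_stable_filter (l : List pvItem) (p : Int) :
    (PySem.List.sorted l pvKV).filter (fun y => pvGetPrice y == some p) =
      l.filter (fun y => pvGetPrice y == some p) := by
  induction l using List.reverseRecOn with
  | nil => simp [PySem.List.sorted]
  | append_singleton l x ih =>
    have hsort : PySem.List.sorted (l ++ [x]) pvKV = PySem.List.insertBy pvB1 x (PySem.List.sorted l pvKV) := by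
      rw [PySem.List.sorted_eq_foldl_insertBy, PySem.List.sorted_eq_foldl_insertBy, List.foldl_append]
      rfl
    rw [hsort]
    by_cases hq : (pvGetPrice x == some p) = true
    · rw [pvFilter_insertBy_pos x hq _ (PySem.List.sorted_pairwise l pvKV), ih]
      simp [List.filter_append, List.filter_cons, hq]
    · have hq' : (pvGetPrice x == some p) = false := by simpa using hq
      rw [pvFilter_insertBy_neg x hq', ih]
      simp [List.filter_append, List.filter_cons, hq']

lemma pvBFold_spec (l : List pvItem) (d : PySem.Dict Int pvItem) (ns : List pvItem) :
    (l.foldl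
      (fun (s : PySem.Dict Int pvItem × List pvItem) it =>
        match pvGetPrice it with
        | none => (s.1, s.2 ++ [it])
        | some p => if s.1.contains p then s else (s.1.insert p it, s.2)) (d, ns)) =
      (PySem.Dict.mk (d.items ++ pvFpp l (fun q => d.contains q)),
        ns ++ l.filter (fun x => (pvGetPrice x).isNone)) := by
  induction l generalizing d ns with
  | nil =>
    simp only [List.foldl_nil, pvFpp, List.filter_nil, List.append_nil]
  | cons x r ih =>
    cases hx : pvGetPrice x with
    | none =>
      simp only [List.foldl_cons, hx]
      rw [ih d (ns ++ [x])]
      have hfn : (x :: r).filter (fun z => (pvGetPrice z).isNone) = x :: r.filter (fun z => (pvGetPrice z).isNone) := by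
        simp [List.filter_cons, hx]
      simp only [pvFpp, hx, hfn]
      simp
    | some p =>
      by_cases hc : d.contains p = true
      · simp only [List.foldl_cons, hx, hc, if_pos]
        rw [ih d ns]
        have hfn : (x :: r).filter (fun z => (pvGetPrice z).isNone) = r.filter (fun z => (pvGetPrice z).isNone) := by
          simp [List.filter_cons, hx]
        simp only [pvFpp, hx, hc, if_pos, hfn]
      · have hc' : d.contains p = false := by simpa using hc
        simp only [List.foldl_cons, hx, hc', Bool.false_eq_true, if_false]
        rw [ih (d.insert p x) ns]
        have hfn : (x :: r).filter (fun z => (pvGetPrice z).isNone) = r.filter (fun z => (pvGetPrice z).isNone) := by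
          simp [List.filter_cons, hx]
        have hitems : (d.insert p x).items = d.items ++ [(p, x)] :=
          PySem.Dict.items_insert_of_not_contains d x hc'
        have hcont : (fun q => (d.insert p x).contains q) = (fun q => q == p || d.contains q) := by
          funext q
          exact PySem.Dict.contains_insert d p q x
        simp only [pvFpp, hx, hc', Bool.false_eq_true, if_false, hfn, hitems, hcont]
        simp

lemma pvInsertAsc_eq (pr : Int × pvItem) (L : List (Int × pvItem)) :
    pvInsertAsc pr L = PySem.List.insertBy (fun a b => decide (a.1 < b.1)) pr L := by
  induction L with
  | nil => rfl
  | cons q qs ih =>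
    simp only [pvInsertAsc, PySem.List.insertBy]
    by_cases h : pr.1 < q.1
    · simp [h]
    · simp [h, ih]

lemma pvLength_insertBy {β : Type} (b : β → β → Bool) (pr : β) (S : List β) :
    (PySem.List.insertBy b pr S).length = S.length + 1 := by
  induction S with
  | nil => rfl
  | cons s S' ih =>
    by_cases h : b pr s = true
    · simp [PySem.List.insertBy, h]
    · have h' : b pr s = false := by simpa using h
      simp [PySem.List.insertBy, h', ih]

lemma pvTake_insertBy {β : Type} (b : β → β → Bool) (pr : β) (S : List β) (n : ℕ) :
    (PySem.List.insertBy b pr (S.take n)).take n = (PySem.List.insertBy b pr S).take n := by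
  induction S generalizing n with
  | nil => simp
  | cons s S' ih =>
    cases n with
    | zero => simp
    | succ m =>
      rw [List.take_succ_cons]
      by_cases h : b pr s = true
      · simp only [PySem.List.insertBy, h, if_pos]
        rw [List.take_succ_cons, List.take_succ_cons]
        cases m with
        | zero => simp
        | succ k =>
          rw [List.take_succ_cons, List.take_succ_cons, List.take_take]
          simp [Nat.min_def]
      · have h' : b pr s = false := by simpa using h
        simp only [PySem.List.insertBy, h', Bool.false_eq_true, if_false]
        rw [List.take_succ_cons, List.take_succ_cons, ih m]

lemma pvBestFold (pairs : List (Int × pvItem)) (full : List (Int × pvItem)) :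
    pairs.foldl
      (fun best pr => if 3 < (pvInsertAsc pr best).length then (pvInsertAsc pr best).dropLast else pvInsertAsc pr best)
      (full.take 3) =
    (pairs.foldl (fun acc pr => PySem.List.insertBy (fun a b => decide (a.1 < b.1)) pr acc) full).take 3 := by
  induction pairs generalizing full with
  | nil => simp
  | cons pr rest ih =>
    simp only [List.foldl_cons]
    have hstep : (if 3 < (pvInsertAsc pr (full.take 3)).length then (pvInsertAsc pr (full.take 3)).dropLast else pvInsertAsc pr (full.take 3))
        = (PySem.List.insertBy (fun a b => decide (a.1 < b.1)) pr full).take 3 := by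
      simp only [pvInsertAsc_eq]
      set b := PySem.List.insertBy (fun a b => decide (a.1 < b.1)) pr (full.take 3) with hb
      have hlen : b.length = (full.take 3).length + 1 := pvLength_insertBy _ _ _
      by_cases h : 3 < b.length
      · have h3 : (full.take 3).length = 3 := by
          have := List.length_take_le 3 full
          omega
        have : b.dropLast = b.take 3 := by
          rw [List.dropLast_eq_take, hlen, h3]
        simp only [h, if_pos, this]
        rw [hb, pvTake_insertBy]
      · have : b.length ≤ 3 := by omega
        simp only [h, if_neg, if_false]
        conv_lhs => rw [show b = b.take 3 from (List.take_of_length_le this).symm]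
        rw [hb, pvTake_insertBy]
    rw [hstep]
    exact ih _

lemma pvFilter_priced_filter (items : List pvItem) (p : Int) :
    (items.filter (fun x => (pvGetPrice x).isSome)).filter (fun y => pvGetPrice y == some p)
      = items.filter (fun y => pvGetPrice y == some p) := by
  rw [List.filter_filter]
  apply List.filter_congr
  intro y _
  cases h : pvGetPrice y with
  | none => simp [h]
  | some q => simp [h]

lemma pvFpp_sorted (items : List pvItem) :
    PySem.List.sorted (pvFpp items (fun _ => false)) (fun q => q.1) =
      pvFpp (PySem.List.sorted (items.filter (fun x => (pvGetPrice x).isSome)) pvKV) (fun _ => false) := by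
  apply PySem.List.sorted_eq_of_perm_of_pairwise_lt
  · rw [List.perm_ext_iff_of_nodup (pvFpp_nodup _ _) (pvFpp_nodup _ _)]
    intro pr
    rw [pvFpp_mem, pvFpp_mem]
    rw [pvSort_stable_filter, pvFilter_priced_filter]
  · exact pvFpp_pairwise _ _ (PySem.List.sorted_pairwise _ _)

lemma pvMain_eq (items : List (List (String × Option Int))) :
    take_up_to_3_unique_prices_py items = take_up_to_3_unique_prices_py_alt items := by
  have hemptyS : (fun q => PySem.Set.contains PySem.Set.empty q) = (fun _ : Int => false) := by
    funext q
    simp [PySem.Set.empty, PySem.Set.contains]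
  have hemptyD : (fun q => (PySem.Dict.empty : PySem.Dict Int pvItem).contains q) = (fun _ : Int => false) := by
    funext q
    exact PySem.Dict.contains_empty q
  -- A side
  have hA : take_up_to_3_unique_prices_py items =
      (((pvFpp (PySem.List.sorted (items.filter (fun x => (pvGetPrice x).isSome)) pvKV)
          (fun _ => false)).map Prod.snd).take 3)
        ++ (items.filter (fun x => (pvGetPrice x).isNone)).take
            (3 - (((pvFpp (PySem.List.sorted (items.filter (fun x => (pvGetPrice x).isSome)) pvKV)
          (fun _ => false)).map Prod.snd).take 3).length) := by
    show pvLoopA (PySem.List.sorted2 items _ _) PySem.Set.empty [] = _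
    rw [pvSort_split items]
    have hsome : ∀ x ∈ PySem.List.sorted (items.filter (fun x => (pvGetPrice x).isSome)) pvKV,
        (pvGetPrice x).isSome := by
      intro x hx
      have : x ∈ items.filter (fun x => (pvGetPrice x).isSome) :=
        (PySem.List.mem_sorted _ _ _ _).mp hx
      exact (List.mem_filter.mp this).2
    have hnone : ∀ y ∈ items.filter (fun x => (pvGetPrice x).isNone), pvGetPrice y = none := by
      intro y hy
      simpa using (List.mem_filter.mp hy).2
    rw [pvLoopA_split _ _ _ _ hsome hnone]
    rw [hemptyS]
    simp
  rw [hA]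
  -- B side
  simp only [take_up_to_3_unique_prices_py_alt]
  rw [pvBFold_spec items PySem.Dict.empty []]
  rw [hemptyD]
  have hDitems : (PySem.Dict.empty : PySem.Dict Int pvItem).items = [] := rfl
  simp only [hDitems, List.nil_append]
  have hbest : (pvFpp items (fun _ => false)).foldl
      (fun best pr => if 3 < (pvInsertAsc pr best).length then (pvInsertAsc pr best).dropLast else pvInsertAsc pr best) []
      = (PySem.List.sorted (pvFpp items (fun _ => false)) (fun q => q.1)).take 3 := by
    have h0 : ([] : List (Int × pvItem)) = ([] : List (Int × pvItem)).take 3 := rfl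
    rw [h0, pvBestFold, PySem.List.sorted_eq_foldl_insertBy]
  rw [hbest, pvFpp_sorted items]
  rw [← List.map_take]

-- ===== VERDICT (by name: the statement is the Claim_ definition above) =====
theorem take_up_to_3_unique_prices_py_spec : Claim_equal_take_up_to_3_unique_prices_py := by
  intro items _
  unfold Spec_take_up_to_3_unique_prices_py
  exact pvMain_eq items
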